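-- pv_equiv track=rewrite | github.com/numerologia-graziella/numerologia-web | pages/4_compatibilita_coppia.py | analizza_nome_base
-- ===== SOURCE A (Python) =====
-- def valore_lettera(c):
--     """Restituisce il valore numerico di una lettera secondo la tabella Pitagorica."""
--     tabella = {
--         "A": 1, "J": 1, "S": 1,
--         "B": 2, "K": 2, "T": 2,
--         "C": 3, "L": 3, "U": 3,
--         "D": 4, "M": 4, "V": 4,
--         "E": 5, "N": 5, "W": 5,
--         "F": 6, "O": 6, "X": 6,
--         "G": 7, "P": 7, "Y": 7,
--         "H": 8, "Q": 8, "Z": 8,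
--         "I": 9, "R": 9
--     }
--     return tabella.get(c.upper(), 0)
--
-- def analizza_nome_base(nome_input):
--     """Analizza il nome per ottenere somma vocali, consonanti e totale."""
--     vocali = "AEIOU"
--     nome_input = nome_input.upper().replace(" ", "") # Rimuovi spazi per il calcolo
--
--     total_val = 0
--     vowels_sum = 0
--     consonants_sum = 0
--
--     for char in nome_input:
--         val = valore_lettera(char)
--         if val != 0: # Solo se la lettera ha un valore numerico
--             total_val += val
--             if char in vocali:
--                 vowels_sum += val
--             else:
--                 consonants_sum += val
--
--     return {
--         "total": total_val,
--         "vowels_sum": vowels_sum,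
--         "consonants_sum": consonants_sum
--     }
-- ===== SOURCE B (Python) =====
-- def valore_lettera(c):
--     """Restituisce il valore numerico di una lettera secondo la tabella Pitagorica."""
--     tabella = {
--         "A": 1, "J": 1, "S": 1,
--         "B": 2, "K": 2, "T": 2,
--         "C": 3, "L": 3, "U": 3,
--         "D": 4, "M": 4, "V": 4,
--         "E": 5, "N": 5, "W": 5,
--         "F": 6, "O": 6, "X": 6,
--         "G": 7, "P": 7, "Y": 7,
--         "H": 8, "Q": 8, "Z": 8,
--         "I": 9, "R": 9
--     }
--     return tabella.get(c.upper(), 0)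
--
-- def analizza_nome_base(nome_input):
--     """Analizza il nome per ottenere somma vocali, consonanti e totale."""
--     s = nome_input.upper().replace(" ", "")
--     total_val = sum(valore_lettera(c) for c in s)
--     vowels_sum = sum(valore_lettera(c) for c in s if c in "AEIOU")
--     return {
--         "total": total_val,
--         "vowels_sum": vowels_sum,
--         "consonants_sum": total_val - vowels_sum
--     }
-- ===== Notes on version B (the rewrite author's own statement) =====
-- stated objective: simpler
-- what changed: Replaces the per-character if/else accumulator loop by two comprehension sums (total and vowels) and derives the consonant sum algebraically as total - vowels.
import Mathlib
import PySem

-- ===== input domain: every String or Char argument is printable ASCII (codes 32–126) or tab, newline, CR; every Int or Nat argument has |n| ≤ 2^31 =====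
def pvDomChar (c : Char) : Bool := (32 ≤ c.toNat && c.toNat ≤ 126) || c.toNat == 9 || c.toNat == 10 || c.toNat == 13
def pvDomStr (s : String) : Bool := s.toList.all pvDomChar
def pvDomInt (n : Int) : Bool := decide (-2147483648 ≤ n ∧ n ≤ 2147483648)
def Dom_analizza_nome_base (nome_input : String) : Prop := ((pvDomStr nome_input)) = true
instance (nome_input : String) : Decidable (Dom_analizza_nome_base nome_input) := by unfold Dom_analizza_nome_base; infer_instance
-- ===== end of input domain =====

-- B computes the vowel sum and the grand total with two comprehension-style sums and derives
-- the consonant sum as total - vowels, replacing A's per-character if/else accumulator loop (simpler).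

-- ===== PORT A =====
-- the Pythagorean letter table of valore_lettera (dict literal, insertion order)
def pv_tabella : PySem.Dict Char Int :=
  PySem.Dict.ofList [('A',1),('J',1),('S',1),('B',2),('K',2),('T',2),('C',3),('L',3),('U',3),
   ('D',4),('M',4),('V',4),('E',5),('N',5),('W',5),('F',6),('O',6),('X',6),
   ('G',7),('P',7),('Y',7),('H',8),('Q',8),('Z',8),('I',9),('R',9)]

-- valore_lettera: tabella.get(c.upper(), 0) (c is always a single character here)
def valore_lettera (c : Char) : Int :=
  PySem.Dict.getD pv_tabella (PySem.Chars.upperChar c) 0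

def analizza_nome_base (nome_input : String) : List (String × Int) :=
  let vocali : List Char := ['A','E','I','O','U']
  let s := PySem.Chars.replace (PySem.Chars.upper nome_input.toList) [' '] []
  let st := s.foldl (fun (acc : Int × Int × Int) char =>
      let val := valore_lettera char
      if val ≠ 0 then
        if vocali.contains char then (acc.1 + val, acc.2.1 + val, acc.2.2)
        else (acc.1 + val, acc.2.1, acc.2.2 + val)
      else acc) (0, 0, 0)
  [("total", st.1), ("vowels_sum", st.2.1), ("consonants_sum", st.2.2)]

-- ===== PORT B =====
def analizza_nome_base_alt (nome_input : String) : List (String × Int) :=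
  let s := PySem.Chars.replace (PySem.Chars.upper nome_input.toList) [' '] []
  let total_val := (s.map valore_lettera).sum
  let vowels_sum := ((s.filter (fun c => (['A','E','I','O','U'] : List Char).contains c)).map valore_lettera).sum
  [("total", total_val), ("vowels_sum", vowels_sum), ("consonants_sum", total_val - vowels_sum)]

-- ===== PRECONDITION & SPEC =====
def Spec_analizza_nome_base (nome_input : String) (out : List (String × Int)) : Prop := out = analizza_nome_base_alt nome_input
instance (nome_input : String) (out : List (String × Int)) : Decidable (Spec_analizza_nome_base nome_input out) := by unfold Spec_analizza_nome_base; infer_instance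

-- ===== CLAIM (what is proved, stated in full; the proofs are below) =====
def Claim_equal_analizza_nome_base : Prop := ∀ (nome_input : String), Dom_analizza_nome_base nome_input → Spec_analizza_nome_base nome_input (analizza_nome_base nome_input)

-- ===== LEMMAS AND PROOFS =====

-- a character that passes the vowel test has a nonzero letter value
theorem valore_vocale_ne_zero (c : Char)
    (h : (['A','E','I','O','U'] : List Char).contains c = true) : valore_lettera c ≠ 0 := by
  simp [List.contains_eq_mem] at h
  rcases h with h | h | h | h | h <;> subst h <;> simp [valore_lettera, pv_tabella, PySem.Chars.upperChar] <;> decide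

-- loop invariant: A's fold from any accumulator adds B's three sums componentwise
theorem loop_eq (l : List Char) : ∀ (a : Int × Int × Int),
    l.foldl (fun (acc : Int × Int × Int) char =>
      let val := valore_lettera char
      if val ≠ 0 then
        if (['A','E','I','O','U'] : List Char).contains char then (acc.1 + val, acc.2.1 + val, acc.2.2)
        else (acc.1 + val, acc.2.1, acc.2.2 + val)
      else acc) a
    = (a.1 + (l.map valore_lettera).sum,
       a.2.1 + ((l.filter (fun c => (['A','E','I','O','U'] : List Char).contains c)).map valore_lettera).sum,
       a.2.2 + ((l.map valore_lettera).sum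
                 - ((l.filter (fun c => (['A','E','I','O','U'] : List Char).contains c)).map valore_lettera).sum)) := by
  induction l with
  | nil => intro a; simp
  | cons c l ih =>
    intro a
    by_cases hv : (['A','E','I','O','U'] : List Char).contains c = true
    · have hnz := valore_vocale_ne_zero c hv
      simp only [List.foldl_cons, List.filter_cons, hv, List.map_cons, List.sum_cons, ih]
      simp only [hnz, ne_eq, not_false_eq_true, if_pos, List.map_cons, List.sum_cons]
      refine Prod.ext (by dsimp; ring) (Prod.ext (by dsimp; ring) (by dsimp; ring))
    · have hv' : (['A','E','I','O','U'] : List Char).contains c = false := by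
        simpa using hv
      by_cases hz : valore_lettera c = 0
      · simp only [List.foldl_cons, List.filter_cons, hv', List.map_cons, List.sum_cons, ih, hz]
        simp
      · simp only [List.foldl_cons, List.filter_cons, hv', List.map_cons, List.sum_cons, ih]
        simp only [hz, ne_eq, not_false_eq_true, if_true, Bool.false_eq_true, if_false]
        refine Prod.ext (by ring) (Prod.ext (by ring) (by dsimp; ring))

-- ===== VERDICT (by name: the statement is the Claim_ definition above) =====
theorem analizza_nome_base_spec : Claim_equal_analizza_nome_base := by
  intro nome_input _
  unfold Spec_analizza_nome_base analizza_nome_base analizza_nome_base_alt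
  simp only [loop_eq]
  simp
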